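-- pv_equiv track=rewrite | github.com/RacovitaMadalina/Simplex | SimplexImplementation/two_phase_algorithm/phase_two_input_conversion.py | remove_artificial_variables_columns
-- ===== SOURCE A (Python) =====
-- def remove_artificial_variables_columns(simplex_tableaux, column_names):
--     indexes_col_names_corresponding_to_artificial = [int(label.split('_')[1]) - 1
--                                                      for label in column_names if 'y' in label]
--
--     simplex_tableaux_cols_dropped = []
--     for eq_index in range(len(simplex_tableaux)):
--         simplex_tableaux_cols_dropped.append([])
--         for var_index in range(len(simplex_tableaux[0])):
--             if var_index not in indexes_col_names_corresponding_to_artificial: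
--                 simplex_tableaux_cols_dropped[-1].append(simplex_tableaux[eq_index][var_index])
--
--     return simplex_tableaux_cols_dropped
-- ===== SOURCE B (Python) =====
-- def remove_artificial_variables_columns(simplex_tableaux, column_names):
--     artificial = {int(label.split('_')[1]) - 1 for label in column_names if 'y' in label}
--     if not simplex_tableaux:
--         return []
--     num_cols = len(simplex_tableaux[0])
--     # column-wise: transpose, drop artificial columns, transpose back
--     columns = list(zip(*simplex_tableaux))[:num_cols]
--     kept_columns = [col for j, col in enumerate(columns) if j not in artificial]
--     if not kept_columns:
--         return [[] for _ in simplex_tableaux]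
--     return [list(row) for row in zip(*kept_columns)]
-- ===== Notes on version B (the rewrite author's own statement) =====
-- stated objective: alternative
-- what changed: B works column-wise instead of cell-wise: it transposes the tableau with zip(*rows), filters the list of columns by their enumerated index against the artificial-index set, and transposes the kept columns back, replacing A's nested per-row per-column membership-test loop.
-- outside the precondition, e.g. on remove_artificial_variables_columns([[1, 2], [3]], []): A raises IndexError, B returns [[1], [3]]
import Mathlib
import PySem

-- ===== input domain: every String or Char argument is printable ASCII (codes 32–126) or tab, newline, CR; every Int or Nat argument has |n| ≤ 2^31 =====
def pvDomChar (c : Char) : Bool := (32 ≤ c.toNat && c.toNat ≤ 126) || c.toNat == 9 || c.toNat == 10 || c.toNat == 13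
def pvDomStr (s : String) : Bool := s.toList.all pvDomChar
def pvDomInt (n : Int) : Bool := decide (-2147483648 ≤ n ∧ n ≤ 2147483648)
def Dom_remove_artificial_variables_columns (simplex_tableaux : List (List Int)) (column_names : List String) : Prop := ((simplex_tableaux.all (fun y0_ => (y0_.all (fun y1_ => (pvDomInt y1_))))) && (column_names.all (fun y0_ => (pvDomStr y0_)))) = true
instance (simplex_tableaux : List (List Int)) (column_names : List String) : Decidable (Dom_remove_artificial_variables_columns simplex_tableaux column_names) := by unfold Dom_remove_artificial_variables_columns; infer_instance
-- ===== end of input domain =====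

-- B drops artificial columns column-wise: it transposes the tableau (zip(*rows)), filters the
-- transposed column list by index, and transposes back — instead of A's per-cell row scan (objective: alternative).


-- ===== PORT A =====
-- shared helper: [int(label.split('_')[1]) - 1 for label in column_names if 'y' in label]
-- (both Pythons contain this exact comprehension; getD-defaults are only reached outside Pre_)
def pvArtIndexes (column_names : List String) : List Int :=
  (column_names.filter (fun label => PySem.Str.isIn "y" label)).map
    (fun label =>
      (PySem.Int.ofStr? (((PySem.Str.split? label "_").getD []).getD 1 "")).getD 0 - 1)

def remove_artificial_variables_columns (simplex_tableaux : List (List Int)) (column_names : List String) : List (List Int) :=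
  let indexes := pvArtIndexes column_names
  (PySem.List.pyRange 0 simplex_tableaux.length 1).foldl
    (fun acc eq_index =>
      acc ++ [(PySem.List.pyRange 0 (PySem.List.pyGetD simplex_tableaux 0 []).length 1).foldl
        (fun row var_index =>
          if !(indexes.contains var_index) then
            row ++ [PySem.List.pyGetD (PySem.List.pyGetD simplex_tableaux eq_index []) var_index 0]
          else row) []]) []

-- ===== PORT B =====
-- zip(*rows): the list of columns, truncated to the shortest row (exact port of Python's zip
-- over the unpacked rows; the getD default is never reached since i < every row's length)
def pvZipStar (rows : List (List Int)) : List (List Int) :=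
  (List.range (((rows.map List.length).min?).getD 0)).map
    (fun i => rows.map (fun r => r.getD i 0))

def remove_artificial_variables_columns_alt (simplex_tableaux : List (List Int)) (column_names : List String) : List (List Int) :=
  let artificial : PySem.Set Int := PySem.Set.ofList (pvArtIndexes column_names)
  if simplex_tableaux.isEmpty then []
  else
    let num_cols := (simplex_tableaux.headD []).length
    let columns := (pvZipStar simplex_tableaux).take num_cols
    let kept_columns := (PySem.List.enumerate columns).filterMap
      (fun p => if artificial.contains p.1 then none else some p.2)
    if kept_columns.isEmpty then simplex_tableaux.map (fun _ => ([] : List Int))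
    else pvZipStar kept_columns

-- ===== PRECONDITION & SPEC =====
-- Pre_ excludes exactly the inputs on which Python A raises: a label containing 'y' whose
-- part after '_' does not parse as an int (ValueError / IndexError when there is no part),
-- and a row shorter than the first row (IndexError on simplex_tableaux[eq_index][var_index]).
def Pre_remove_artificial_variables_columns (simplex_tableaux : List (List Int)) (column_names : List String) : Prop :=
  (∀ label ∈ column_names, PySem.Str.isIn "y" label = true →
      (PySem.Int.ofStr? (((PySem.Str.split? label "_").getD []).getD 1 "")).isSome = true) ∧
  (∀ row ∈ simplex_tableaux, (simplex_tableaux.headD []).length ≤ row.length)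
instance (simplex_tableaux : List (List Int)) (column_names : List String) : Decidable (Pre_remove_artificial_variables_columns simplex_tableaux column_names) := by unfold Pre_remove_artificial_variables_columns; infer_instance

def pvWitness_remove_artificial_variables_columns : List (List Int) × List String :=
  ([[1, 2, 3], [4, 5, 6]], ["x_1", "y_2", "x_3"])

def Spec_remove_artificial_variables_columns (simplex_tableaux : List (List Int)) (column_names : List String) (out : List (List Int)) : Prop := out = remove_artificial_variables_columns_alt simplex_tableaux column_names
instance (simplex_tableaux : List (List Int)) (column_names : List String) (out : List (List Int)) : Decidable (Spec_remove_artificial_variables_columns simplex_tableaux column_names out) := by unfold Spec_remove_artificial_variables_columns; infer_instance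

-- ===== CLAIM (what is proved, stated in full; the proofs are below) =====
def Claim_equal_remove_artificial_variables_columns : Prop := ∀ (simplex_tableaux : List (List Int)) (column_names : List String), Dom_remove_artificial_variables_columns simplex_tableaux column_names → Pre_remove_artificial_variables_columns simplex_tableaux column_names → Spec_remove_artificial_variables_columns simplex_tableaux column_names (remove_artificial_variables_columns simplex_tableaux column_names)

-- ===== LEMMAS AND PROOFS =====

-- indexing a list of rows through range(len) is mapping over the rows
theorem pv_getD_map_range (l : List (List Int)) (g : List Int → List Int) :
    (List.range l.length).map (fun i => g (l.getD i [])) = l.map g := by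
  induction l using List.reverseRecOn with
  | nil => rfl
  | append_singleton xs x ih =>
      simp [List.range_succ, ih.symm]
      intro a ha
      rw [List.getElem?_append_left ha]

-- enumerate of a range-indexed map pairs each index with its image
theorem pv_enum_map_range (f : Nat → List Int) (n : Nat) :
    PySem.List.enumerate ((List.range n).map f) (0:Int) = (List.range n).map (fun (i : Nat) => ((i:Int), f i)) := by
  induction n with
  | zero => rfl
  | succ m ih =>
      rw [List.range_succ, List.map_append, PySem.List.enumerate_append, ih, List.map_append]
      simp [PySem.List.enumerate]

-- the if-none/some filterMap is filter-then-map
theorem pv_filterMap_if (l : List Nat) (p : Nat → Bool) (f : Nat → List Int) :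
    l.filterMap (fun a => if p a then none else some (f a)) = (l.filter (fun a => !p a)).map f := by
  induction l with
  | nil => rfl
  | cons x xs ih => by_cases h : p x <;> simp [h, ih]

-- the canonical value both programs compute (proof-only helper)
def pvKept (n : Nat) (idx : List Int) : List Nat :=
  (List.range n).filter (fun j => !(idx.contains (j:Int)))

theorem pv_A_eq_canon (simplex_tableaux : List (List Int)) (column_names : List String) :
    remove_artificial_variables_columns simplex_tableaux column_names
      = simplex_tableaux.map
          (fun row => (pvKept (simplex_tableaux.headD []).length (pvArtIndexes column_names)).map
            (fun j => row.getD j 0)) := by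
  unfold remove_artificial_variables_columns
  cases simplex_tableaux with
  | nil => rfl
  | cons r rs =>
    simp only [List.headD_cons, PySem.List.pyGetD_zero_cons]
    rw [PySem.List.foldl_append_singleton_eq_map, List.nil_append]
    have hinner : ∀ i : Int,
        (PySem.List.pyRange 0 (r.length : Int) 1).foldl
          (fun row var_index =>
            if !((pvArtIndexes column_names).contains var_index) then
              row ++ [PySem.List.pyGetD (PySem.List.pyGetD (r :: rs) i []) var_index 0]
            else row) []
        = (pvKept r.length (pvArtIndexes column_names)).map
            (fun j => (PySem.List.pyGetD (r :: rs) i []).getD j 0) := by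
      intro i
      rw [PySem.List.foldl_append_if
        (fun v => !((pvArtIndexes column_names).contains v))
        (fun v => PySem.List.pyGetD (PySem.List.pyGetD (r :: rs) i []) v 0), List.nil_append]
      rw [PySem.List.pyRange_zero_natCast, List.filter_map, List.map_map]
      unfold pvKept
      apply List.map_congr_left
      intro j _
      simp [PySem.List.pyGetD_natCast]
    simp only [hinner]
    have hrows :
        (PySem.List.pyRange 0 ((r :: rs).length : Int) 1).map
            (fun i => PySem.List.pyGetD (r :: rs) i ([] : List Int))
          = r :: rs := by
      have := PySem.List.map_pyGetD_pyRange_zero (r :: rs) ([] : List Int)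
      simpa [PySem.List.len_eq] using this
    calc (PySem.List.pyRange 0 ((r :: rs).length : Int) 1).map
            (fun i => (pvKept r.length (pvArtIndexes column_names)).map
              (fun j => (PySem.List.pyGetD (r :: rs) i []).getD j 0))
        = ((PySem.List.pyRange 0 ((r :: rs).length : Int) 1).map
            (fun i => PySem.List.pyGetD (r :: rs) i ([] : List Int))).map
            (fun row => (pvKept r.length (pvArtIndexes column_names)).map
              (fun j => row.getD j 0)) := by
          rw [List.map_map]; rfl
      _ = (r :: rs).map
            (fun row => (pvKept r.length (pvArtIndexes column_names)).map
              (fun j => row.getD j 0)) := by rw [hrows]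

theorem pv_B_eq_canon (simplex_tableaux : List (List Int)) (column_names : List String)
    (hpre : ∀ row ∈ simplex_tableaux, (simplex_tableaux.headD []).length ≤ row.length) :
    remove_artificial_variables_columns_alt simplex_tableaux column_names
      = simplex_tableaux.map
          (fun row => (pvKept (simplex_tableaux.headD []).length (pvArtIndexes column_names)).map
            (fun j => row.getD j 0)) := by
  unfold remove_artificial_variables_columns_alt
  cases simplex_tableaux with
  | nil => rfl
  | cons r rs =>
    simp only [List.isEmpty_cons, Bool.false_eq_true, if_false, List.headD_cons]
    set st := r :: rs with hst
    set n := r.length with hn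
    -- the minimum of row lengths is at least n
    have hmin : n ≤ ((st.map List.length).min?).getD 0 := by
      obtain ⟨m, hm⟩ : ∃ m, (st.map List.length).min? = some m := by
        cases h : (st.map List.length).min? with
        | none => rw [List.min?_eq_none_iff] at h; simp [hst] at h
        | some m => exact ⟨m, rfl⟩
      rw [hm, Option.getD_some]
      rw [List.min?_eq_some_iff] at hm
      obtain ⟨hmem, -⟩ := hm
      rw [List.mem_map] at hmem
      obtain ⟨row, hrow, hlen⟩ := hmem
      have h2 := hpre row hrow
      rw [hst, List.headD_cons] at h2
      omega
    -- step 1: the truncated transpose is the first n columns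
    have hcols : (pvZipStar st).take n
        = (List.range n).map (fun i => st.map (fun r' => r'.getD i 0)) := by
      unfold pvZipStar
      rw [← List.map_take, List.take_range, Nat.min_eq_left hmin]
    rw [hcols, pv_enum_map_range]
    rw [List.filterMap_map]
    have hfm : (List.range n).filterMap
        ((fun p : Int × List Int => if (PySem.Set.ofList (pvArtIndexes column_names)).contains p.1 then none else some p.2) ∘
          (fun (i : Nat) => ((i:Int), st.map (fun r' => r'.getD i 0))))
        = (pvKept n (pvArtIndexes column_names)).map (fun i => st.map (fun r' => r'.getD i 0)) := by
      have := pv_filterMap_if (List.range n)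
        (fun i => (pvArtIndexes column_names).contains ((i:Nat):Int))
        (fun i => st.map (fun r' => r'.getD i 0))
      unfold pvKept
      rw [← this]
      apply List.filterMap_congr
      intro i _
      simp [Function.comp]
    rw [hfm]
    by_cases hk : pvKept n (pvArtIndexes column_names) = []
    · simp [hk]
    · rw [if_neg (by simp [hk])]
      -- step 3: transpose back
      unfold pvZipStar
      have hlen : ((pvKept n (pvArtIndexes column_names)).map
          (fun i => st.map (fun r' => r'.getD i 0))).map List.length
          = List.replicate (pvKept n (pvArtIndexes column_names)).length st.length := by
        rw [List.map_map,
          List.map_congr_left (g := fun _ => st.length) (fun x _ => by simp [Function.comp]),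
          List.map_const']
      rw [hlen, List.min?_replicate_of_pos (by simp [List.length_pos_iff, hk]), Option.getD_some]
      rw [← pv_getD_map_range st
        (fun row => (pvKept n (pvArtIndexes column_names)).map (fun j => row.getD j 0))]
      apply List.map_congr_left
      intro i _
      rw [List.map_map]
      apply List.map_congr_left
      intro j _
      simp only [Function.comp, List.getD]
      cases h : st[i]? <;> simp [h]

-- ===== VERDICT (by name: the statement is the Claim_ definition above) =====
theorem remove_artificial_variables_columns_spec : Claim_equal_remove_artificial_variables_columns := by
  intro st cn _ hpre
  unfold Spec_remove_artificial_variables_columns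
  rw [pv_A_eq_canon, pv_B_eq_canon st cn hpre.2]
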